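-- pv_equiv track=rewrite | github.com/mttw/project-euler-python | src/projecteuler/problem33.py | produce_simplifications
-- ===== SOURCE A (Python) =====
-- def produce_simplifications(numerator, denominator, exclude=0):
--     s = []
--     num_digits = str(numerator)
--     denom_digits = str(denominator)
--     for i in range(len(num_digits)):
--         for j in range(len(denom_digits)):
--             if num_digits[i] == denom_digits[j] and num_digits[i] != str(exclude):
--                 n = int(num_digits[0:i] + num_digits[i+1:])
--                 d = int(denom_digits[0:j] + denom_digits[j+1:])
--                 s.append((n,d))
--     return s
-- ===== SOURCE B (Python) =====
-- def produce_simplifications(numerator, denominator, exclude=0):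
--     num_digits = str(numerator)
--     denom_digits = str(denominator)
--     ex = str(exclude)
--     # group the denominator once: digit char -> list of denominator remnants, in position order
--     groups = {}
--     for j in range(len(denom_digits)):
--         groups.setdefault(denom_digits[j], []).append(denom_digits[:j] + denom_digits[j + 1:])
--     out = []
--     for i in range(len(num_digits)):
--         c = num_digits[i]
--         if c != ex:
--             g = groups.get(c, [])
--             if g:
--                 n = int(num_digits[:i] + num_digits[i + 1:])
--                 for rest in g:
--                     out.append((n, int(rest)))
--     return out
-- ===== Notes on version B (the rewrite author's own statement) =====
-- stated objective: alternative
-- what changed: B pre-groups the denominator's positions into a dict mapping each digit char to the ordered list of denominator remnants, so the per-numerator-digit inner scan of the denominator becomes a single dict lookup (and the numerator remnant is converted once per position instead of once per match).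
import Mathlib
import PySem

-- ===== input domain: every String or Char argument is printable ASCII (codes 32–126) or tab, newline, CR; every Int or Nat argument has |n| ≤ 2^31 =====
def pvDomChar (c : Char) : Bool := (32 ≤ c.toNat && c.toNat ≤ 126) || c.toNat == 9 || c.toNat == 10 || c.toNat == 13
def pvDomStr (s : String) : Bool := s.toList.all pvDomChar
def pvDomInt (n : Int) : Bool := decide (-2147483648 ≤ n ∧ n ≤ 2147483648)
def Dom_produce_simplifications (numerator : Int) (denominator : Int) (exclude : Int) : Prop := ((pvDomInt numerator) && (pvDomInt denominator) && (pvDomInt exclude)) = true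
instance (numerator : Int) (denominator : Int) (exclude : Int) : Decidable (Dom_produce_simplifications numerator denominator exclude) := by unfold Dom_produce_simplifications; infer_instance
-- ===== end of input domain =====

-- B groups the denominator's digit positions into a dict once, replacing A's inner scan
-- over the denominator per numerator digit by a single grouped lookup (objective: alternative).


-- ===== PORT A =====
-- literal port of A: double loop over the digit positions of str(numerator) / str(denominator);
-- 'int(...)' is PySem.Int.ofChars?; it is none exactly where Python raises ValueError (Pre_
-- excludes those inputs, so the '.getD 0' default is never reached inside Pre_)
def produce_simplifications (numerator : Int) (denominator : Int) (exclude : Int) : List (Int × Int) :=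
  let nd := PySem.Int.toChars numerator
  let dd := PySem.Int.toChars denominator
  let ex := PySem.Int.toChars exclude
  (PySem.List.pyRange 0 (nd.length : Int) 1).foldl (fun s i =>
    (PySem.List.pyRange 0 (dd.length : Int) 1).foldl (fun s j =>
      if PySem.List.pyGetD nd i ' ' = PySem.List.pyGetD dd j ' ' ∧ [PySem.List.pyGetD nd i ' '] ≠ ex then
        s ++ [((PySem.Int.ofChars? (PySem.List.slice nd (some 0) (some i) ++ PySem.List.slice nd (some (i + 1)) none)).getD 0,
               (PySem.Int.ofChars? (PySem.List.slice dd (some 0) (some j) ++ PySem.List.slice dd (some (j + 1)) none)).getD 0)]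
      else s) s) []

-- ===== PORT B =====
-- literal port of Source B: 'groups.setdefault(c, []).append(v)' is Dict.modify c [] (· ++ [v])
def produce_simplifications_alt (numerator : Int) (denominator : Int) (exclude : Int) : List (Int × Int) :=
  let nd := PySem.Int.toChars numerator
  let dd := PySem.Int.toChars denominator
  let ex := PySem.Int.toChars exclude
  let groups : PySem.Dict Char (List (List Char)) :=
    (PySem.List.pyRange 0 (dd.length : Int) 1).foldl (fun g j =>
      PySem.Dict.modify g (PySem.List.pyGetD dd j ' ') []
        (· ++ [PySem.List.slice dd (some 0) (some j) ++ PySem.List.slice dd (some (j + 1)) none])) PySem.Dict.empty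
  (PySem.List.pyRange 0 (nd.length : Int) 1).foldl (fun out i =>
    let c := PySem.List.pyGetD nd i ' '
    if [c] ≠ ex then
      let g := PySem.Dict.getD groups c []
      if g ≠ [] then
        let n := (PySem.Int.ofChars? (PySem.List.slice nd (some 0) (some i) ++ PySem.List.slice nd (some (i + 1)) none)).getD 0
        g.foldl (fun out rest => out ++ [(n, (PySem.Int.ofChars? rest).getD 0)]) out
      else out
    else out) []

-- ===== PRECONDITION & SPEC =====
-- Pre_ excludes exactly the inputs on which Python A raises ValueError: a cancelling match against a
-- single-digit (or single negated digit) numerator or denominator makes int('') or int('-') execute.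
def Pre_produce_simplifications (numerator : Int) (denominator : Int) (exclude : Int) : Prop :=
  ¬ ((0 ≤ numerator ∧ numerator ≤ 9 ∧ numerator ≠ exclude ∧ PySem.Chars.isIn (PySem.Int.toChars numerator) (PySem.Int.toChars denominator) = true)
   ∨ (-9 ≤ numerator ∧ numerator ≤ -1 ∧ -numerator ≠ exclude ∧ PySem.Chars.isIn (PySem.Int.toChars (-numerator)) (PySem.Int.toChars denominator) = true)
   ∨ (0 ≤ denominator ∧ denominator ≤ 9 ∧ denominator ≠ exclude ∧ PySem.Chars.isIn (PySem.Int.toChars denominator) (PySem.Int.toChars numerator) = true)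
   ∨ (-9 ≤ denominator ∧ denominator ≤ -1 ∧ -denominator ≠ exclude ∧ PySem.Chars.isIn (PySem.Int.toChars (-denominator)) (PySem.Int.toChars numerator) = true))
instance (numerator : Int) (denominator : Int) (exclude : Int) : Decidable (Pre_produce_simplifications numerator denominator exclude) := by unfold Pre_produce_simplifications; infer_instance

def pvWitness_produce_simplifications : Int × Int × Int := (49, 98, 0)

def Spec_produce_simplifications (numerator : Int) (denominator : Int) (exclude : Int) (out : List (Int × Int)) : Prop := out = produce_simplifications_alt numerator denominator exclude
instance (numerator : Int) (denominator : Int) (exclude : Int) (out : List (Int × Int)) : Decidable (Spec_produce_simplifications numerator denominator exclude out) := by unfold Spec_produce_simplifications; infer_instance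

-- ===== CLAIM (what is proved, stated in full; the proofs are below) =====
def Claim_equal_produce_simplifications : Prop := ∀ (numerator : Int) (denominator : Int) (exclude : Int), Dom_produce_simplifications numerator denominator exclude → Pre_produce_simplifications numerator denominator exclude → Spec_produce_simplifications numerator denominator exclude (produce_simplifications numerator denominator exclude)

-- ===== LEMMAS AND PROOFS =====

-- the dict built by B maps c to exactly the remnants of the positions j whose digit is c, in j-order
theorem groups_getD (dd : List Char) (c : Char) :
    PySem.Dict.getD ((PySem.List.pyRange 0 (dd.length : Int) 1).foldl (fun g j =>
      PySem.Dict.modify g (PySem.List.pyGetD dd j ' ') []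
        (· ++ [PySem.List.slice dd (some 0) (some j) ++ PySem.List.slice dd (some (j + 1)) none])) PySem.Dict.empty) c []
    = ((PySem.List.pyRange 0 (dd.length : Int) 1).filter (fun j => PySem.List.pyGetD dd j ' ' == c)).map
        (fun j => PySem.List.slice dd (some 0) (some j) ++ PySem.List.slice dd (some (j + 1)) none) := by
  rw [← List.foldl_map (f := fun j => (PySem.List.pyGetD dd j ' ',
        PySem.List.slice dd (some 0) (some j) ++ PySem.List.slice dd (some (j + 1)) none))
        (g := fun d p => PySem.Dict.modify d p.1 [] (· ++ [p.2]))]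
  rw [PySem.Dict.getD_foldl_modify_append, List.filter_map, PySem.Dict.getD_empty, List.map_map]
  rfl

-- A's inner loop over the denominator positions equals B's lookup in the grouped dict
theorem inner_eq (dd ex : List Char) (c : Char) (n : Int) (acc : List (Int × Int)) :
    (PySem.List.pyRange 0 (dd.length : Int) 1).foldl (fun s j =>
      if c = PySem.List.pyGetD dd j ' ' ∧ [c] ≠ ex then
        s ++ [(n, (PySem.Int.ofChars? (PySem.List.slice dd (some 0) (some j) ++ PySem.List.slice dd (some (j + 1)) none)).getD 0)]
      else s) acc
    = (if [c] ≠ ex then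
        (if PySem.Dict.getD ((PySem.List.pyRange 0 (dd.length : Int) 1).foldl (fun g j =>
              PySem.Dict.modify g (PySem.List.pyGetD dd j ' ') []
                (· ++ [PySem.List.slice dd (some 0) (some j) ++ PySem.List.slice dd (some (j + 1)) none])) PySem.Dict.empty) c [] ≠ [] then
          (PySem.Dict.getD ((PySem.List.pyRange 0 (dd.length : Int) 1).foldl (fun g j =>
              PySem.Dict.modify g (PySem.List.pyGetD dd j ' ') []
                (· ++ [PySem.List.slice dd (some 0) (some j) ++ PySem.List.slice dd (some (j + 1)) none])) PySem.Dict.empty) c []).foldl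
            (fun out rest => out ++ [(n, (PySem.Int.ofChars? rest).getD 0)]) acc
        else acc)
      else acc) := by
  rw [PySem.List.foldl_append_ite (p := fun j => c = PySem.List.pyGetD dd j ' ' ∧ [c] ≠ ex), groups_getD]
  by_cases hex : [c] ≠ ex
  · rw [if_pos hex]
    have hfil : ((PySem.List.pyRange 0 (dd.length : Int) 1).filter
          (fun j => decide (c = PySem.List.pyGetD dd j ' ' ∧ [c] ≠ ex)))
        = ((PySem.List.pyRange 0 (dd.length : Int) 1).filter (fun j => PySem.List.pyGetD dd j ' ' == c)) := by
      refine List.filter_congr (fun j _ => ?_)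
      simp only [hex, ne_eq, not_false_eq_true, and_true]
      by_cases hcx : PySem.List.pyGetD dd j ' ' = c
      · simp [hcx]
      · simp [hcx, Ne.symm hcx]
    rw [hfil]
    by_cases hg : ((PySem.List.pyRange 0 (dd.length : Int) 1).filter (fun j => PySem.List.pyGetD dd j ' ' == c)).map
          (fun j => PySem.List.slice dd (some 0) (some j) ++ PySem.List.slice dd (some (j + 1)) none) ≠ []
    · rw [if_pos hg, PySem.List.foldl_append_singleton_eq_map, List.map_map]
      rfl
    · rw [if_neg hg]
      rw [not_not] at hg
      rw [List.map_eq_nil_iff.mp hg]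
      simp
  · rw [if_neg hex, not_not] at *
    have hnil : ((PySem.List.pyRange 0 (dd.length : Int) 1).filter
          (fun j => decide (c = PySem.List.pyGetD dd j ' ' ∧ [c] ≠ ex))) = [] := by
      refine List.filter_eq_nil_iff.mpr (fun j _ => ?_)
      simp [hex]
    rw [hnil]
    simp

theorem produce_simplifications_eq (numerator denominator exclude : Int) :
    produce_simplifications numerator denominator exclude
      = produce_simplifications_alt numerator denominator exclude := by
  unfold produce_simplifications produce_simplifications_alt
  refine PySem.List.foldl_congr_mem _ _ _ _ (fun acc i _ => ?_)
  exact inner_eq (PySem.Int.toChars denominator) (PySem.Int.toChars exclude)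
    (PySem.List.pyGetD (PySem.Int.toChars numerator) i ' ')
    ((PySem.Int.ofChars? (PySem.List.slice (PySem.Int.toChars numerator) (some 0) (some i)
      ++ PySem.List.slice (PySem.Int.toChars numerator) (some (i + 1)) none)).getD 0) acc

-- ===== VERDICT (by name: the statement is the Claim_ definition above) =====
theorem produce_simplifications_spec : Claim_equal_produce_simplifications := by
  intro numerator denominator exclude _ _
  exact produce_simplifications_eq numerator denominator exclude
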